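-- pv_equiv track=rewrite | github.com/manu-sapiens/text2pptx | app.py | decode_schema_string
-- ===== SOURCE A (Python) =====
-- def decode_schema_string(schema_string):
--     # create a new array to store the parsed schema
--     # go through the string character by character
--     # if the character is a delimiter (either "{" "}" "[" "]" "," ":") then add it to the parsed array as is
--     # if the character is not in that list, take note of the start index and keep going until you find the end index or the next delimiter
--     # once you have the start and end index, extract the string and add it to the parsed array
--     # however, if a fragment is between backticks ("`"), do not look for diminters between the backticks and remove the backticks from the final string
--
--     # Now go through the parsed array and recreate the new string 'schema'
--     # If the element is a string, add quotes around it and add it to the schema string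
--     # If the element is not a string, add it to the schema string as is
--     # return schema
--
--     parsed = []
--     word = "" # a word is anyting that is between delimiters
--     backtick_word = False
--
--     delimiters = ['{', '}', '[', ']', ',', ':']
--
--     length = len(schema_string)
--     for i in range(length):
--         c = schema_string[i]
--
--         if c == "`":
--             if backtick_word:
--                 # end of a word between backticks. Note that the backticks themselves are discarded
--                 parsed.append(word)
--                 backtick_word = False
--                 word = ""
--             else:
--                 if word == "":
--                     # beginning of a word between backticks. Note that the backticks themselves are discarded
--                     backtick_word = True
--                 else:
--                     # mid sentence `, so we just add it to the word
--                     word += c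
--                 #
--             #
--         else:
--             if c in delimiters and backtick_word == False:
--                 # is it a closing delimiter?
--                 if word != "":
--                     parsed.append(word)
--                     word = ""
--                 #
--                 parsed.append(c)
--             else:
--                 word += c
--             #
--     #
--     if word != "":
--         parsed.append(word)
--     #
--
--     schema = ""
--     for p in parsed:
--         if p in delimiters:
--             schema += p
--         else:
--             word = p.strip()
--             if word != "": schema += f'"{word}"'
--         #
--     #
--
--     return schema
-- ===== SOURCE B (Python) =====
-- def decode_schema_string(schema_string):
--     # Token-consuming scan: instead of a char-by-char state machine, jump
--     # whole tokens at a time with an index and slices; rebuild pass unchanged.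
--     s = schema_string
--     delimiters = ['{', '}', '[', ']', ',', ':']
--     n = len(s)
--     parsed = []
--     i = 0
--     while i < n:
--         c = s[i]
--         if c in delimiters:
--             parsed.append(c)
--             i += 1
--         elif c == '`':
--             j = s.find('`', i + 1)
--             if j == -1:
--                 # unterminated backtick: rest of the string is the word
--                 if i + 1 < n:
--                     parsed.append(s[i + 1:])
--                 i = n
--             else:
--                 parsed.append(s[i + 1:j])  # empty content appended too
--                 i = j + 1
--         else:
--             j = i + 1
--             while j < n and s[j] not in delimiters:  # backticks absorbed mid-word
--                 j += 1
--             parsed.append(s[i:j])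
--             i = j
--
--     schema = ""
--     for p in parsed:
--         if p in delimiters:
--             schema += p
--         else:
--             word = p.strip()
--             if word != "":
--                 schema += f'"{word}"'
--     return schema
-- ===== Notes on version B (the rewrite author's own statement) =====
-- stated objective: alternative
-- what changed: Replaces A's char-by-char accumulator state machine (word buffer + backtick flag) with an index-driven scan that consumes whole tokens at a time: delimiter chars, backtick-quoted slices found via s.find, and whole word slices up to the next delimiter; the rebuild pass is unchanged.
import Mathlib
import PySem

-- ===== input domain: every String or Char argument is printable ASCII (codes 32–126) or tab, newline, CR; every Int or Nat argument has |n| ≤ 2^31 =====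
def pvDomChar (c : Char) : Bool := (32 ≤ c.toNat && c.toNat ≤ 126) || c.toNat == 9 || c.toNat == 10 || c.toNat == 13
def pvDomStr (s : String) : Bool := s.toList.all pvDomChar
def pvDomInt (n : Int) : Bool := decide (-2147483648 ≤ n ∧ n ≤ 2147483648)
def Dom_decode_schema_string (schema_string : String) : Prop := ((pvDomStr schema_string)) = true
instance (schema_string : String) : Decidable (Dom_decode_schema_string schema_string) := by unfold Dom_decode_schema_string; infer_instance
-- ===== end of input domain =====

-- B replaces A's char-by-char state machine with an index/slice token scan (alternative decomposition, same cost); return values proved equal on all inputs.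

-- ===== PORT A =====
-- c in delimiters (chars)
def pvDelim (c : Char) : Bool := c == '{' || c == '}' || c == '[' || c == ']' || c == ',' || c == ':'
-- p in delimiters (one-char token strings)
def pvDelimTok (p : List Char) : Bool :=
  p == ['{'] || p == ['}'] || p == ['['] || p == [']'] || p == [','] || p == [':']

-- one iteration of A's for-loop; state = (parsed, word, backtick_word)
def pvStepA (st : List (List Char) × List Char × Bool) (c : Char) :
    List (List Char) × List Char × Bool :=
  let parsed := st.1
  let word := st.2.1
  let bt := st.2.2
  if c = '`' then
    if bt then (parsed ++ [word], [], false)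
    else if word = [] then (parsed, word, true)
    else (parsed, word ++ [c], bt)
  else
    if pvDelim c && !bt then
      ((if word ≠ [] then parsed ++ [word] else parsed) ++ [[c]], [], bt)
    else (parsed, word ++ [c], bt)

-- the trailing `if word != "": parsed.append(word)`
def pvFinishA (st : List (List Char) × List Char × Bool) : List (List Char) :=
  if st.2.1 ≠ [] then st.1 ++ [st.2.1] else st.1

-- A's second loop rebuilding `schema`
def pvRebuildA (parsed : List (List Char)) : List Char :=
  parsed.foldl (fun sch p =>
    if pvDelimTok p then sch ++ p
    else
      let w := PySem.Chars.strip p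
      if w ≠ [] then sch ++ ('"' :: (w ++ ['"'])) else sch) []

def decode_schema_string (schema_string : String) : String :=
  String.mk (pvRebuildA (pvFinishA (schema_string.toList.foldl pvStepA ([], [], false))))

-- ===== PORT B =====
-- B's while-loop: each call consumes one whole token from the front (index scan ≙ takeWhile/dropWhile of the remaining suffix)
def pvTokB : List Char → List (List Char)
  | [] => []
  | c :: rest =>
    if pvDelim c then
      [c] :: pvTokB rest
    else if c = '`' then
      -- j = s.find('`', i+1); slice out s[i+1:j] (or the unterminated tail)
      let seg := rest.takeWhile (fun x => x ≠ '`')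
      match h : rest.dropWhile (fun x => x ≠ '`') with
      | [] => if seg ≠ [] then [seg] else []
      | _ :: rest' => seg :: pvTokB rest'
    else
      -- scan j to the next delimiter (backticks absorbed); slice s[i:j]
      (c :: rest.takeWhile (fun x => !pvDelim x)) :: pvTokB (rest.dropWhile (fun x => !pvDelim x))
termination_by l => l.length
decreasing_by
  · simp [Nat.lt_succ_iff]
  · have h1 := List.length_dropWhile_le (fun x => x ≠ '`') rest
    rw [h] at h1
    simp at h1 ⊢
    omega
  · have h1 := List.length_dropWhile_le (fun x => !pvDelim x) rest
    simp at h1 ⊢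
    omega

-- B's rebuild pass (same shape as A's, per the task: rebuild unchanged)
def pvRebuildB (parsed : List (List Char)) : List Char :=
  parsed.foldl (fun sch p =>
    if pvDelimTok p then sch ++ p
    else
      let w := PySem.Chars.strip p
      if w ≠ [] then sch ++ ('"' :: (w ++ ['"'])) else sch) []

def decode_schema_string_alt (schema_string : String) : String :=
  String.mk (pvRebuildB (pvTokB schema_string.toList))

-- ===== PRECONDITION & SPEC =====
def Spec_decode_schema_string (schema_string : String) (out : String) : Prop := out = decode_schema_string_alt schema_string
instance (schema_string : String) (out : String) : Decidable (Spec_decode_schema_string schema_string out) := by unfold Spec_decode_schema_string; infer_instance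

-- ===== CLAIM (what is proved, stated in full; the proofs are below) =====
def Claim_equal_decode_schema_string : Prop := ∀ (schema_string : String), Dom_decode_schema_string schema_string → Spec_decode_schema_string schema_string (decode_schema_string schema_string)

-- ===== LEMMAS AND PROOFS =====

-- what A's remaining loop will eventually append, given the current (backtick_word, word) state
def pvResume : Bool → List Char → List Char → List (List Char)
  | _, w, [] => if w = [] then [] else [w]
  | true, w, c :: rest =>
      if c = '`' then w :: pvResume false [] rest else pvResume true (w ++ [c]) rest
  | false, w, c :: rest =>
      if c = '`' then
        if w = [] then pvResume true [] rest else pvResume false (w ++ [c]) rest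
      else if pvDelim c then
        (if w = [] then [] else [w]) ++ [c] :: pvResume false [] rest
      else pvResume false (w ++ [c]) rest

lemma pvFoldA_resume (l : List Char) (p : List (List Char)) (w : List Char) (bt : Bool) :
    pvFinishA (l.foldl pvStepA (p, w, bt)) = p ++ pvResume bt w l := by
  induction l generalizing p w bt with
  | nil =>
      cases bt <;> by_cases hw : w = [] <;> simp [pvFinishA, pvResume, hw]
  | cons c rest ih =>
      simp only [List.foldl_cons]
      by_cases hc : c = '`'
      · subst hc
        cases bt with
        | true => simp [pvStepA, pvResume, ih]
        | false =>
            by_cases hw : w = [] <;> simp [pvStepA, pvResume, hw, ih]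
      · cases bt with
        | true => simp [pvStepA, pvResume, hc, ih]
        | false =>
            by_cases hd : pvDelim c
            · by_cases hw : w = [] <;> simp [pvStepA, pvResume, hc, hd, hw, ih]
            · simp [pvStepA, pvResume, hc, hd, ih]

-- equation lemmas for pvTokB (well-founded recursion does not unfold definitionally)
lemma pvTokB_delim (c : Char) (rest : List Char) (hd : pvDelim c) :
    pvTokB (c :: rest) = [c] :: pvTokB rest := by
  rw [pvTokB]; simp [hd]

lemma pvTokB_word (c : Char) (rest : List Char) (hd : ¬ pvDelim c) (hc : c ≠ '`') :
    pvTokB (c :: rest) =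
      (c :: rest.takeWhile (fun x => !pvDelim x)) :: pvTokB (rest.dropWhile (fun x => !pvDelim x)) := by
  rw [pvTokB]; simp [hd, hc]

lemma pvTokB_bt (rest : List Char) :
    pvTokB ('`' :: rest) =
      match rest.dropWhile (fun x => x ≠ '`') with
      | [] => if rest.takeWhile (fun x => x ≠ '`') ≠ [] then [rest.takeWhile (fun x => x ≠ '`')] else []
      | _ :: rest' => rest.takeWhile (fun x => x ≠ '`') :: pvTokB rest' := by
  rw [pvTokB]
  rw [if_neg (by decide), if_pos rfl]
  split
  · next heq => simp only [heq]
  · next a b heq => simp only [heq]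

lemma pvResume_tok : ∀ (n : Nat) (l : List Char), l.length ≤ n →
    (pvResume false [] l = pvTokB l) ∧
    (∀ w : List Char, w ≠ [] →
      pvResume false w l =
        (w ++ l.takeWhile (fun x => !pvDelim x)) :: pvTokB (l.dropWhile (fun x => !pvDelim x))) ∧
    (∀ w : List Char,
      pvResume true w l =
        match l.dropWhile (fun x => x ≠ '`') with
        | [] => if w ++ l.takeWhile (fun x => x ≠ '`') = [] then []
                else [w ++ l.takeWhile (fun x => x ≠ '`')]
        | _ :: r => (w ++ l.takeWhile (fun x => x ≠ '`')) :: pvTokB r) := by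
  intro n
  induction n with
  | zero =>
      intro l hl
      have : l = [] := List.eq_nil_of_length_eq_zero (Nat.le_zero.mp hl)
      subst this
      refine ⟨by simp [pvResume, pvTokB], ?_, ?_⟩
      · intro w hw; simp [pvResume, hw, pvTokB]
      · intro w; by_cases hw : w = [] <;> simp [pvResume, hw]
  | succ n ih =>
      intro l hl
      match l with
      | [] =>
          refine ⟨by simp [pvResume, pvTokB], ?_, ?_⟩
          · intro w hw; simp [pvResume, hw, pvTokB]
          · intro w; by_cases hw : w = [] <;> simp [pvResume, hw]
      | c :: rest =>
          have hrest : rest.length ≤ n := by simpa using Nat.succ_le_succ_iff.mp hl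
          obtain ⟨ih1, ih2, ih3⟩ := ih rest hrest
          refine ⟨?_, ?_, ?_⟩
          · -- start of a fresh token
            by_cases hc : c = '`'
            · subst hc
              have h3 := ih3 []
              simp only [List.nil_append] at h3
              rw [show pvResume false [] ('`' :: rest) = pvResume true [] rest from by
                    simp [pvResume],
                h3, pvTokB_bt]
              cases hdw : rest.dropWhile (fun x => x ≠ '`') with
              | nil =>
                  simp only [hdw]
                  by_cases hs : rest.takeWhile (fun x => x ≠ '`') = []
                  · rw [if_pos hs, if_neg (not_not_intro hs)]
                  · rw [if_neg hs, if_pos hs]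
              | cons a r => simp only [hdw]
            · by_cases hd : pvDelim c
              · rw [pvTokB_delim c rest hd]
                simp [pvResume, hc, hd, ih1]
              · rw [pvTokB_word c rest hd hc]
                have h2 := ih2 [c] (by simp)
                simp only [pvResume, if_neg hc, hd, Bool.not_false, Bool.false_eq_true, if_false,
                  List.nil_append, h2]
                simp
          · -- continuing a nonempty word (backticks absorbed)
            intro w hw
            by_cases hc : c = '`'
            · subst hc
              have h2 := ih2 (w ++ ['`']) (by simp)
              simp only [pvResume, if_pos rfl, if_neg hw, h2, List.takeWhile_cons,
                List.dropWhile_cons, show pvDelim '`' = false from rfl, Bool.not_false, if_true]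
              simp
            · by_cases hd : pvDelim c
              · simp only [pvResume, if_neg hc, hd, Bool.not_false, if_true, List.takeWhile_cons,
                  List.dropWhile_cons, Bool.not_true, Bool.false_eq_true, if_false, hw, ih1]
                simp [hw, pvTokB_delim c rest hd]
              · have h2 := ih2 (w ++ [c]) (by simp)
                simp only [pvResume, if_neg hc, hd, Bool.not_false, Bool.false_eq_true, if_false,
                  h2, List.takeWhile_cons, List.dropWhile_cons, if_true]
                simp [hd]
          · -- inside a backtick segment
            intro w
            by_cases hc : c = '`'
            · subst hc
              rw [show pvResume true w ('`' :: rest) = w :: pvResume false [] rest from by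
                    simp [pvResume]]
              simp only [ih1, List.dropWhile_cons, List.takeWhile_cons]
              simp
            · rw [show pvResume true w (c :: rest) = pvResume true (w ++ [c]) rest from by
                  simp [pvResume, hc]]
              rw [ih3 (w ++ [c])]
              simp only [List.dropWhile_cons, List.takeWhile_cons, hc, ne_eq,
                not_false_eq_true, decide_true, if_true]
              cases rest.dropWhile (fun x => x ≠ '`') <;> simp

lemma pvRebuild_eq (parsed : List (List Char)) : pvRebuildA parsed = pvRebuildB parsed := rfl

-- ===== VERDICT (by name: the statement is the Claim_ definition above) =====
theorem decode_schema_string_spec : Claim_equal_decode_schema_string := by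
  intro s _
  unfold Spec_decode_schema_string decode_schema_string decode_schema_string_alt
  rw [pvFoldA_resume, pvRebuild_eq,
    (pvResume_tok s.toList.length s.toList le_rfl).1]
  simp
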